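-- pv_equiv track=rewrite | github.com/TRI-DataProjects/data-pull-tools | data_pull_tools/infer_index.py | _index_columns_from_repeat_column_names
-- ===== SOURCE A (Python) =====
-- from collections import defaultdict
--
-- def _index_columns_from_repeat_column_names(cols_list: list) -> list[int]:
--     index_cols: list[int] = []
--
--     # Tally column names
--     tally = defaultdict(list)
--     for i, item in enumerate(cols_list):
--         tally[item].append(i)
--
--     # Append the locations with only one item
--     for locs in tally.values():
--         if len(locs) == 1:
--             index_cols.append(locs[0])
--
--     return index_cols
-- ===== SOURCE B (Python) =====
-- def _index_columns_from_repeat_column_names(cols_list: list) -> list[int]: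
--     # An element is a singleton iff it appears neither before nor after its position.
--     return [
--         i
--         for i, item in enumerate(cols_list)
--         if item not in cols_list[:i] and item not in cols_list[i + 1 :]
--     ]
-- ===== Notes on version B (the rewrite author's own statement) =====
-- stated objective: alternative
-- what changed: Drops the tally table entirely: instead of building a dict of per-name index lists and scanning its values, B tests each position directly by membership scans over the prefix and suffix slices around it (quadratic brute force, no auxiliary structure), emitting singleton indices in index order.
import Mathlib
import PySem

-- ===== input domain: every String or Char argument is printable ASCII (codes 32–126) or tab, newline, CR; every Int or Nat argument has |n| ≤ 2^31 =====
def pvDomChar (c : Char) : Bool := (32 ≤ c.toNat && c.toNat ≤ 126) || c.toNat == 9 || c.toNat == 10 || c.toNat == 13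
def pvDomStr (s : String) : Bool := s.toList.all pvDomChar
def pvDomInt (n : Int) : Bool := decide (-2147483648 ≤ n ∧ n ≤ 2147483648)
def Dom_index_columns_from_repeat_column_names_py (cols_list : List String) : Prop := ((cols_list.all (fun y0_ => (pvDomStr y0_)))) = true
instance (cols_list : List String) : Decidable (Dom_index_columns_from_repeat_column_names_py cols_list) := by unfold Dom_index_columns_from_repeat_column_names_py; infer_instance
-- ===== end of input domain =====

-- B drops the tally table entirely: it tests each position's uniqueness directly by
-- membership scans over the prefix and suffix slices around it (alternative algorithm).


-- ===== PORT A =====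
-- locs[0] is taken inside the 'len(locs) == 1' branch, so pyGet? is always 'some' there (.getD 0 is exact)
def index_columns_from_repeat_column_names_py (cols_list : List String) : List Int :=
  let tally : PySem.Dict String (List Int) :=
    (PySem.List.enumerate cols_list).foldl
      (fun d p => d.modify p.2 [] (fun l => l ++ [p.1])) PySem.Dict.empty
  tally.values.foldl
    (fun acc locs =>
      if locs.length == 1 then acc ++ [(PySem.List.pyGet? locs 0).getD 0] else acc) []

-- ===== PORT B =====
def index_columns_from_repeat_column_names_py_alt (cols_list : List String) : List Int :=
  ((PySem.List.enumerate cols_list).filter (fun p =>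
      !(PySem.List.slice cols_list none (some p.1)).contains p.2 &&
      !(PySem.List.slice cols_list (some (p.1 + 1)) none).contains p.2)).map (fun p => p.1)

-- ===== PRECONDITION & SPEC =====
def Spec_index_columns_from_repeat_column_names_py (cols_list : List String) (out : List Int) : Prop := out = index_columns_from_repeat_column_names_py_alt cols_list
instance (cols_list : List String) (out : List Int) : Decidable (Spec_index_columns_from_repeat_column_names_py cols_list out) := by unfold Spec_index_columns_from_repeat_column_names_py; infer_instance

-- ===== CLAIM (what is proved, stated in full; the proofs are below) =====
def Claim_equal_index_columns_from_repeat_column_names_py : Prop := ∀ (cols_list : List String), Dom_index_columns_from_repeat_column_names_py cols_list → Spec_index_columns_from_repeat_column_names_py cols_list (index_columns_from_repeat_column_names_py cols_list)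

-- ===== LEMMAS AND PROOFS =====

/-- The list of indices at which `k` occurs in `cols`, in increasing order. -/
def pvIdxs (cols : List String) (k : String) : List Int :=
  ((PySem.List.enumerate cols).filter (fun p => p.2 == k)).map (fun p => p.1)

theorem pvIdxs_snoc (cols : List String) (x k : String) :
    pvIdxs (cols ++ [x]) k
      = pvIdxs cols k ++ (if x == k then [(cols.length : Int)] else []) := by
  unfold pvIdxs
  rw [PySem.List.enumerate_append, List.filter_append, List.map_append]
  congr 1
  by_cases h : x = k
  · subst h
    simp [PySem.List.enumerate_cons, PySem.List.enumerate_nil]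
  · simp [PySem.List.enumerate_cons, PySem.List.enumerate_nil, h]

theorem pvIdxs_length (cols : List String) (k : String) :
    (pvIdxs cols k).length = cols.count k := by
  induction cols using List.reverseRecOn with
  | nil => simp [pvIdxs, PySem.List.enumerate_nil]
  | append_singleton cols x ih =>
    rw [pvIdxs_snoc, List.count_append]
    by_cases h : x = k
    · subst h; simp [ih]
    · simp [ih, h, beq_iff_eq]

theorem pvIdxs_of_not_mem (cols : List String) (k : String) (h : k ∉ cols) :
    pvIdxs cols k = [] := by
  have := pvIdxs_length cols k
  rw [List.count_eq_zero_of_not_mem h] at this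
  exact List.eq_nil_of_length_eq_zero this

/-- KEY: emitting `f k` over the distinct names (in first-occurrence order) that satisfy a
predicate true only on names occurring at most once equals emitting the indices in index order. -/
theorem pvKey (cols : List String) (q : String → Bool)
    (hq : ∀ k, q k = true → cols.count k ≤ 1) :
    ((PySem.Set.ofList cols).filter q).map
        (fun k => (PySem.List.pyGet? (pvIdxs cols k) 0).getD 0)
      = ((PySem.List.enumerate cols).filter (fun p => q p.2)).map (fun p => p.1) := by
  induction cols using List.reverseRecOn with
  | nil => simp [PySem.Set.ofList_nil, PySem.List.enumerate_nil]
  | append_singleton cols x ih =>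
    have hq' : ∀ k, q k = true → cols.count k ≤ 1 := by
      intro k hk
      have := hq k hk
      rw [List.count_append] at this
      omega
    have hR : ((PySem.List.enumerate (cols ++ [x])).filter (fun p => q p.2)).map (fun p => p.1)
        = ((PySem.List.enumerate cols).filter (fun p => q p.2)).map (fun p => p.1)
          ++ (if q x then [(cols.length : Int)] else []) := by
      rw [PySem.List.enumerate_append, List.filter_append, List.map_append]
      congr 1
      by_cases h : q x
      · simp [PySem.List.enumerate_cons, PySem.List.enumerate_nil, h]
      · simp [PySem.List.enumerate_cons, PySem.List.enumerate_nil, h]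
    rw [hR, PySem.Set.ofList_append_singleton]
    by_cases hx : x ∈ PySem.Set.ofList cols
    · have hxc : x ∈ cols := (PySem.Set.mem_ofList cols x).1 hx
      have hqx : q x = false := by
        by_contra h
        have hq1 := hq x (by simpa using h)
        have hpos : 1 ≤ cols.count x := List.count_pos_iff.2 hxc
        rw [List.count_append] at hq1
        simp at hq1
        omega
      rw [PySem.Set.add_of_mem hx, hqx]
      simp only [Bool.false_eq_true, if_false, List.append_nil]
      rw [← ih hq']
      apply List.map_congr_left
      intro k hk
      rw [List.mem_filter] at hk
      have hkq : q k = true := hk.2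
      have hne : x ≠ k := by
        intro h; rw [h] at hqx; rw [hqx] at hkq; exact absurd hkq (by simp)
      rw [pvIdxs_snoc]
      simp [beq_iff_eq, hne]
    · have hxc : x ∉ cols := fun h => hx ((PySem.Set.mem_ofList cols x).2 h)
      rw [PySem.Set.add_of_not_mem hx, List.filter_append, List.map_append]
      have h1 : ((PySem.Set.ofList cols).filter q).map
          (fun k => (PySem.List.pyGet? (pvIdxs (cols ++ [x]) k) 0).getD 0)
          = ((PySem.List.enumerate cols).filter (fun p => q p.2)).map (fun p => p.1) := by
        rw [← ih hq']
        apply List.map_congr_left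
        intro k hk
        rw [List.mem_filter] at hk
        have hkc : k ∈ cols := (PySem.Set.mem_ofList cols k).1 hk.1
        have hne : x ≠ k := fun h => hxc (h ▸ hkc)
        rw [pvIdxs_snoc]
        simp [beq_iff_eq, hne]
      rw [h1]
      congr 1
      by_cases hqx : q x = true
      · simp only [if_true, List.filter_singleton, hqx, cond_true,
          List.map_cons, List.map_nil]
        rw [pvIdxs_snoc, pvIdxs_of_not_mem cols x hxc]
        simp [PySem.List.pyGet?, PySem.List.pyIdx?]
      · simp [hqx]

theorem tally_getD (cols : List String) (k : String) :
    ((PySem.List.enumerate cols).foldl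
        (fun d p => d.modify p.2 [] (fun l => l ++ [p.1])) PySem.Dict.empty).getD k []
      = pvIdxs cols k := by
  have hfm : (PySem.List.enumerate cols).foldl
        (fun d p => d.modify p.2 [] (fun l => l ++ [p.1])) PySem.Dict.empty
      = ((PySem.List.enumerate cols).map Prod.swap).foldl
        (fun d p => d.modify p.1 [] (fun l => l ++ [p.2])) PySem.Dict.empty := by
    rw [List.foldl_map]; simp
  rw [hfm, PySem.Dict.getD_foldl_modify_append]
  unfold pvIdxs
  simp [PySem.Dict.getD_empty, List.filter_map, List.map_map, Function.comp_def]

theorem tally_keys (cols : List String) :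
    ((PySem.List.enumerate cols).foldl
        (fun d p => d.modify p.2 [] (fun l => l ++ [p.1])) PySem.Dict.empty).keys
      = PySem.Set.ofList cols := by
  rw [PySem.Dict.keys_foldl_modify_key]
  simp [PySem.List.map_snd_enumerate, PySem.Set.update_nil_left, PySem.Dict.keys_empty]

/-- On a member `(i, x)` of `enumerate cols`, B's prefix/suffix membership test is exactly
`cols.count x == 1`. -/
theorem pvPred_eq (cols : List String) (p : Int × String)
    (hp : p ∈ PySem.List.enumerate cols 0) :
    (!(PySem.List.slice cols none (some p.1)).contains p.2 &&
     !(PySem.List.slice cols (some (p.1 + 1)) none).contains p.2)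
      = (cols.count p.2 == 1) := by
  obtain ⟨k, hk, rfl⟩ := (PySem.List.mem_enumerate_iff cols 0 p).1 hp
  simp only [zero_add]
  rw [PySem.List.slice_to_natCast]
  have h1 : ((k : Int) + 1) = ((k + 1 : Nat) : Int) := by push_cast; ring
  rw [h1, PySem.List.slice_from_natCast]
  have hv : cols = cols.take k ++ cols[k] :: cols.drop (k + 1) := by
    conv_lhs => rw [← List.take_append_drop k cols]
    rw [List.drop_eq_getElem_cons hk]
  have hsplit : cols.count cols[k]
      = (cols.take k).count cols[k] + 1 + (cols.drop (k + 1)).count cols[k] := by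
    have hgen : ∀ v, v = cols[k] →
        cols.count v = (cols.take k).count v + 1 + (cols.drop (k + 1)).count v := by
      intro v hveq
      conv_lhs => rw [hv]
      rw [List.count_append, List.count_cons, hveq]
      simp
      omega
    exact hgen _ rfl
  by_cases hpre : cols[k] ∈ cols.take k
  · have : 1 ≤ (cols.take k).count cols[k] := List.count_pos_iff.2 hpre
    simp only [List.contains_eq_mem, hpre, decide_true, Bool.not_true, Bool.false_and]
    symm; simp only [beq_eq_false_iff_ne, ne_eq]
    omega
  · by_cases hsuf : cols[k] ∈ cols.drop (k + 1)
    · have : 1 ≤ (cols.drop (k + 1)).count cols[k] := List.count_pos_iff.2 hsuf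
      simp only [List.contains_eq_mem, hpre, hsuf, decide_true, decide_false,
        Bool.not_true, Bool.not_false, Bool.and_false]
      symm; simp only [beq_eq_false_iff_ne, ne_eq]
      omega
    · have e1 : (cols.take k).count cols[k] = 0 := List.count_eq_zero_of_not_mem hpre
      have e2 : (cols.drop (k + 1)).count cols[k] = 0 := List.count_eq_zero_of_not_mem hsuf
      simp only [List.contains_eq_mem, hpre, hsuf, decide_false, Bool.not_false,
        Bool.and_true]
      symm; simp only [beq_iff_eq]
      omega

-- ===== VERDICT (by name: the statement is the Claim_ definition above) =====
theorem index_columns_from_repeat_column_names_py_spec : Claim_equal_index_columns_from_repeat_column_names_py := by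
  intro cols _
  unfold Spec_index_columns_from_repeat_column_names_py
  unfold index_columns_from_repeat_column_names_py index_columns_from_repeat_column_names_py_alt
  simp only []
  rw [PySem.Dict.values_eq_map_keys _ (by rw [tally_keys]; exact PySem.Set.nodup_ofList cols) []]
  rw [List.foldl_map]
  rw [PySem.List.foldl_append_if]
  rw [tally_keys]
  simp only [tally_getD, List.nil_append]
  have hq : (fun k => (pvIdxs cols k).length == 1) = (fun k => cols.count k == 1) := by
    funext k; rw [pvIdxs_length]
  rw [hq]
  rw [pvKey cols (fun k => cols.count k == 1) (fun k hk => Nat.le_of_eq (beq_iff_eq.1 hk))]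
  congr 1
  exact List.filter_congr (fun p hp => (pvPred_eq cols p hp).symm)
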